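-- pv_equiv track=rewrite | github.com/Demonslayerrrr/qr_generator | src/encode.py | numeric
-- ===== SOURCE A (Python) =====
-- def numeric(s: str) -> tuple:
--     s = s.replace(" ", "")  # remove all spaces
--     character_count = len(s)
--
--     output = ""
--     i = 0
--     while i < len(s):
--         if i + 3 <= len(s):
--             group = s[i:i + 3]
--             output += format(int(group), "010b")
--             i += 3
--         elif i + 2 <= len(s):
--             group = s[i:i + 2]
--             output += format(int(group), "07b")
--             i += 2
--         else:
--             group = s[i]
--             output += format(int(group), "04b")
--             i += 1
--
--     return character_count, output, "numeric"
-- ===== SOURCE B (Python) =====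
-- def numeric(s: str) -> tuple:
--     # Single pass: skip spaces, accumulate each digit into a running group value,
--     # flush 10-bit chunks every 3 digits, then flush the 7/4-bit tail once.
--     count = 0
--     v = 0
--     n = 0
--     pieces = []
--     for ch in s:
--         if ch == ' ':
--             continue
--         count += 1
--         v = v * 10 + int(ch)
--         n += 1
--         if n == 3:
--             pieces.append(format(v, '010b'))
--             v = 0
--             n = 0
--     if n == 2:
--         pieces.append(format(v, '07b'))
--     elif n == 1:
--         pieces.append(format(v, '04b'))
--     return count, "".join(pieces), "numeric"
-- ===== Notes on version B (the rewrite author's own statement) =====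
-- stated objective: alternative
-- what changed: Replaces A's index-and-slice while loop (slicing 3/2/1-character groups and parsing each with int(group)) by a single accumulator pass over the characters that skips spaces, folds each digit into a running group value, flushes a 10-bit chunk every third digit and flushes the 7/4-bit tail once after the loop.
-- outside the precondition, e.g. on numeric('+12'): A returns (3, '0000001100', 'numeric'), B raises ValueError; on numeric('1_2'): A returns (3, '0000001100', 'numeric'), B raises ValueError
import Mathlib
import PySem

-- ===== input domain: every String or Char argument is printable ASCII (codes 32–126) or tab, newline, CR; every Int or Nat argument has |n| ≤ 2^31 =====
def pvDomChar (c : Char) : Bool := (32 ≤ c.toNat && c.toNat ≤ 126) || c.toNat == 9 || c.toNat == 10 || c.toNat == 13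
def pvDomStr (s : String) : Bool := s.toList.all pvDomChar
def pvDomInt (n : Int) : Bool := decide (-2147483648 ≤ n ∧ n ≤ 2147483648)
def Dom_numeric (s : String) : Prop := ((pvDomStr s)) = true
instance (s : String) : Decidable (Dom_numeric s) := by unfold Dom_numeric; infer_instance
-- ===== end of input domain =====

-- B is a single accumulator pass over the characters (skip spaces, running group value,
-- flush every 3 digits, flush the tail once) instead of A's index-and-slice while loop.

-- ===== PORT A =====
-- format(n, '0{w}b'): zero-padded binary; exact for the nonnegative values formatted here
-- (under Pre_ every group is a string of digits, so int(group) ≥ 0).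
def padBin (n : Int) (w : Nat) : List Char :=
  let ds := PySem.Int.toBinChars n  -- format(n, 'b')
  List.replicate (w - ds.length) '0' ++ ds

-- int(group); Pre_ guarantees the parse succeeds (none = ValueError, excluded by Pre_)
def pyIntChars (cs : List Char) : Int := (PySem.Int.ofChars? cs).getD 0

-- A's while loop over index i into s, written as recursion on the suffix s[i:]
-- (s[i:i+3] = take 3, i += 3 = drop 3; branch order as in A).
def numericLoop (rest : List Char) : List Char :=
  if rest.length = 0 then []                                      -- i < len(s) fails: loop ends
  else if 3 ≤ rest.length then
    padBin (pyIntChars (rest.take 3)) 10 ++ numericLoop (rest.drop 3)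
  else if 2 ≤ rest.length then
    padBin (pyIntChars (rest.take 2)) 7 ++ numericLoop (rest.drop 2)
  else
    padBin (pyIntChars (rest.take 1)) 4 ++ numericLoop (rest.drop 1)
termination_by rest.length
decreasing_by all_goals (simp; omega)

def numeric (s : String) : Int × String × String :=
  let t := (PySem.Str.replace s " " "").toList   -- s = s.replace(" ", "")
  ((t.length : Int), String.ofList (numericLoop t), "numeric")

-- ===== PORT B =====
-- one step of B's for-loop; state = (count, v, n, pieces)
def altStep (st : Int × Int × Int × List (List Char)) (ch : Char) :
    Int × Int × Int × List (List Char) :=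
  let (count, v, n, pieces) := st
  if ch = ' ' then st                                   -- continue
  else
    let count := count + 1
    let v := v * 10 + (PySem.Int.ofChars? [ch]).getD 0  -- v = v*10 + int(ch); ValueError excluded by Pre_
    let n := n + 1
    if n = 3 then (count, 0, 0, pieces ++ [padBin v 10])
    else (count, v, n, pieces)

def numeric_alt (s : String) : Int × String × String :=
  let st := s.toList.foldl altStep (0, 0, 0, [])
  let pieces :=
    if st.2.2.1 = 2 then st.2.2.2 ++ [padBin st.2.1 7]
    else if st.2.2.1 = 1 then st.2.2.2 ++ [padBin st.2.1 4]
    else st.2.2.2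
  (st.1, String.ofList pieces.flatten, "numeric")           -- "".join(pieces)

-- ===== PRECONDITION & SPEC =====
-- Pre_ excludes inputs where int(group) raises ValueError (any non-digit, non-space character),
-- and with it the int-literal oddities ('+12', '1_2', tab-padded groups) that Python's int()
-- still accepts inside a 3-character slice but B's per-character int(ch) rejects.
def Pre_numeric (s : String) : Prop :=
  (s.toList.filter (fun c => c ≠ ' ')).all Char.isDigit = true
instance (s : String) : Decidable (Pre_numeric s) := by unfold Pre_numeric; infer_instance
def pvWitness_numeric : String := "01 2345 6"

def Spec_numeric (s : String) (out : Int × String × String) : Prop := out = numeric_alt s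
instance (s : String) (out : Int × String × String) : Decidable (Spec_numeric s out) := by unfold Spec_numeric; infer_instance

-- ===== CLAIM (what is proved, stated in full; the proofs are below) =====
def Claim_equal_numeric : Prop := ∀ (s : String), Dom_numeric s → Pre_numeric s → Spec_numeric s (numeric s)

-- ===== LEMMAS AND PROOFS =====

-- s.replace(" ", "") removes exactly the spaces
theorem replace_go_space (fuel : Nat) : ∀ (l acc : List Char), l.length ≤ fuel →
    PySem.Chars.replace.go [' '] [] fuel l acc = acc.reverse ++ l.filter (fun c => c ≠ ' ') := by
  induction fuel with
  | zero => intro l acc h; simp at h; simp [h, PySem.Chars.replace.go]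
  | succ f ih =>
    intro l acc h
    cases l with
    | nil => simp [PySem.Chars.replace.go]
    | cons c t =>
      simp only [PySem.Chars.replace.go, List.isPrefixOf]
      by_cases hc : c = ' '
      · subst hc
        simp [ih t acc (by simpa using Nat.le_of_succ_le_succ h)]
      · simp [hc, ih t (c :: acc) (by simpa using Nat.le_of_succ_le_succ h)]
        intro h'; exact absurd h'.symm hc

theorem replace_space (s : String) :
    (PySem.Str.replace s " " "").toList = s.toList.filter (fun c => c ≠ ' ') := by
  rw [PySem.Str.toList_replace]
  show PySem.Chars.replace s.toList [' '] [] = _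
  rw [PySem.Chars.replace]
  simp [replace_go_space s.length s.toList [] (by simp)]

def digits10 : List Char := ['0','1','2','3','4','5','6','7','8','9']

theorem digit_mem (c : Char) (h : c.isDigit = true) : c ∈ digits10 := by
  have h1 : 48 ≤ c.toNat ∧ c.toNat ≤ 57 := by
    simp [Char.isDigit, UInt32.le_iff_toNat_le] at h
    exact ⟨h.1, h.2⟩
  have h2 : c.toNat = 48 ∨ c.toNat = 49 ∨ c.toNat = 50 ∨ c.toNat = 51 ∨ c.toNat = 52 ∨ c.toNat = 53 ∨ c.toNat = 54 ∨ c.toNat = 55 ∨ c.toNat = 56 ∨ c.toNat = 57 := by omega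
  rcases h2 with h2|h2|h2|h2|h2|h2|h2|h2|h2|h2 <;> rw [← Char.ofNat_toNat c, h2] <;> decide

theorem digit_ne_space (c : Char) (h : c.isDigit = true) : c ≠ ' ' := by
  intro hc; subst hc; simp [Char.isDigit] at h

-- int() of a 2/3-digit group = the positional combination of int() of its digits
-- (finite check over the 10 digit characters, kernel-evaluated)
theorem pairValB : (digits10.all fun a => digits10.all fun b =>
    pyIntChars [a, b] == pyIntChars [a] * 10 + pyIntChars [b]) = true := by rfl

theorem tripleValB : (digits10.all fun a => digits10.all fun b => digits10.all fun c =>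
    pyIntChars [a, b, c] == (pyIntChars [a] * 10 + pyIntChars [b]) * 10 + pyIntChars [c]) = true := by rfl

theorem pairVal : ∀ a ∈ digits10, ∀ b ∈ digits10,
    pyIntChars [a, b] = pyIntChars [a] * 10 + pyIntChars [b] := by
  have h := pairValB; simp only [List.all_eq_true, beq_iff_eq] at h; exact h

theorem tripleVal : ∀ a ∈ digits10, ∀ b ∈ digits10, ∀ c ∈ digits10,
    pyIntChars [a, b, c] = (pyIntChars [a] * 10 + pyIntChars [b]) * 10 + pyIntChars [c] := by
  have h := tripleValB; simp only [List.all_eq_true, beq_iff_eq] at h; exact h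

-- fold over the raw characters = fold over the space-free characters
theorem fold_filter (l : List Char) (st : Int × Int × Int × List (List Char)) :
    l.foldl altStep st = (l.filter (fun c => c ≠ ' ')).foldl altStep st := by
  induction l generalizing st with
  | nil => rfl
  | cons c t ih =>
    by_cases hc : c = ' '
    · subst hc; simp [List.foldl, altStep, ih]
    · simp [List.foldl, hc, ih]

-- finishing B from state (cnt, 0, 0, ps): count and joined bits
def finishB (st : Int × Int × Int × List (List Char)) : Int × List Char :=
  (st.1,
   (if st.2.2.1 = 2 then st.2.2.2 ++ [padBin st.2.1 7]
    else if st.2.2.1 = 1 then st.2.2.2 ++ [padBin st.2.1 4]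
    else st.2.2.2).flatten)

-- main invariant: B's fold-then-flush over a digit list equals A's grouped loop
theorem main_inv : ∀ (t : List Char), t.all Char.isDigit = true →
    ∀ (cnt : Int) (ps : List (List Char)),
      finishB (t.foldl altStep (cnt, 0, 0, ps)) = (cnt + t.length, ps.flatten ++ numericLoop t) := by
  intro t
  induction hn : t.length using Nat.strong_induction_on generalizing t with
  | _ n ih =>
  rcases t with _ | ⟨a, _ | ⟨b, _ | ⟨c, rest⟩⟩⟩
  · intro _ cnt ps
    subst hn
    rw [numericLoop]
    simp [finishB]
  · intro hd cnt ps
    simp only [List.all_cons, List.all_nil, Bool.and_true] at hd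
    subst hn
    rw [numericLoop]
    simp [List.foldl, altStep, digit_ne_space a hd, finishB, numericLoop, pyIntChars]
  · intro hd cnt ps
    simp only [List.all_cons, List.all_nil, Bool.and_true, Bool.and_eq_true] at hd
    obtain ⟨ha, hb⟩ := hd
    subst hn
    rw [numericLoop]
    simp [List.foldl, altStep, digit_ne_space a ha, digit_ne_space b hb, finishB, numericLoop,
      pyIntChars]
    have hp := pairVal a (digit_mem a ha) b (digit_mem b hb)
    simp only [pyIntChars] at hp
    rw [hp]
    refine ⟨by ring, ?_⟩
    rfl
  · intro hd cnt ps
    simp only [List.all_cons, Bool.and_eq_true] at hd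
    obtain ⟨ha, hb, hc, hrest⟩ := hd
    subst hn
    have ih' := ih rest.length (by simp; omega) rest rfl hrest
    rw [numericLoop]
    simp only [List.length_cons, List.foldl, altStep, digit_ne_space a ha, digit_ne_space b hb,
      digit_ne_space c hc, if_false]
    norm_num
    rw [ih']
    rw [tripleVal a (digit_mem a ha) b (digit_mem b hb) c (digit_mem c hc)]
    simp [pyIntChars]
    ring

-- ===== VERDICT (by name: the statement is the Claim_ definition above) =====
theorem numeric_spec : Claim_equal_numeric := by
  intro s _ hpre
  show numeric s = numeric_alt s
  have h := main_inv _ hpre 0 []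
  simp only [finishB, Prod.mk.injEq, zero_add, List.flatten_nil, List.nil_append] at h
  rw [numeric, numeric_alt, replace_space, fold_filter]
  exact Prod.ext h.1.symm (Prod.ext (congrArg String.ofList h.2.symm) rfl)
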